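-- pv_equiv track=rewrite | github.com/hoover82/webscraping | webscrape_nps.py | split_park_name_for_url
-- ===== SOURCE A (Python) =====
-- def split_park_name_for_url ( unit_name_in ):
--     url_component = []
--     comma_split = unit_name_in.split(',')
--     if comma_split == None:
--         comma_split = [unit_name_in]
--     for chunk in comma_split:
--         space_split = chunk.split ( ' ')
--         if space_split == None:
--             space_split = [chunk]
--         for component in space_split:
--             url_component.append(component)
--
--     for i, c in enumerate ( url_component ):
--         if i == 0:
--             retval = 'address={}'.format(c)
-- # Not passing city,state, so no comma needed in URL
-- #        elif i == len(url_component)-2: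
-- #            retval = "{}+{},".format(retval,c)
--         else:
--             retval = "{}+{}".format(retval,c)
--
--     return retval
-- ===== SOURCE B (Python) =====
-- def split_park_name_for_url(unit_name_in):
--     # One flat tokenization: turn commas into spaces, split once on ' '
--     # (preserving empty tokens), then join with '+'.
--     tokens = unit_name_in.replace(',', ' ').split(' ')
--     return 'address=' + '+'.join(tokens)
-- ===== Notes on version B (the rewrite author's own statement) =====
-- stated objective: simpler
-- what changed: Replaces the nested comma/space split loops and the enumerate-driven concatenation accumulator with one flat tokenization (replace ',' by ' ', single split on ' ') and a single '+'.join.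
import Mathlib
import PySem

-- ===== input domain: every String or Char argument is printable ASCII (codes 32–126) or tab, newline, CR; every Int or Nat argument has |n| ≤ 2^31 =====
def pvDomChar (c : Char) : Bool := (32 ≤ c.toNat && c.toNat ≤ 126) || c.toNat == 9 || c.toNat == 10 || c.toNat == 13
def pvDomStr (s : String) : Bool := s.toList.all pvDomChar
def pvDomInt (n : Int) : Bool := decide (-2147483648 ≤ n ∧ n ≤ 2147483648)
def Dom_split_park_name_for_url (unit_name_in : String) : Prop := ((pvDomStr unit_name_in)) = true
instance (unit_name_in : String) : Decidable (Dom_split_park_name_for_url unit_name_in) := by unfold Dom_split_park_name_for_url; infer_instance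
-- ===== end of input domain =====

-- B replaces A's nested comma/space split loops and enumerate accumulator with one
-- flat tokenization (replace ',' with ' ', one split on ' ') plus a '+'-join; simpler.


-- ===== PORT A =====
-- Literal transliteration of A: split on ',', dead `== None` branch kept as the
-- Option `none` case, nested append loop, then the enumerate loop building retval
-- (retval starts unbound in Python → Option accumulator starting at none).
def split_park_name_for_url (unit_name_in : String) : String :=
  let s := unit_name_in.toList
  let comma_split : List (List Char) :=
    match PySem.Chars.split? s [','] with
    | some l => l
    | none => [s]
  let url_component : List (List Char) :=
    comma_split.foldl (fun acc chunk =>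
      let space_split : List (List Char) :=
        match PySem.Chars.split? chunk [' '] with
        | some l => l
        | none => [chunk]
      space_split.foldl (fun a c => a ++ [c]) acc) []
  let retval : Option (List Char) :=
    (PySem.List.enumerate url_component).foldl
      (fun r ic =>
        if ic.1 = 0 then some ("address=".toList ++ ic.2)
        else some ((r.getD []) ++ '+' :: ic.2)) none
  String.ofList (retval.getD [])

-- ===== PORT B =====
def split_park_name_for_url_alt (unit_name_in : String) : String :=
  let tokens := PySem.Chars.splitOn (PySem.Chars.replace unit_name_in.toList [','] [' ']) [' ']
  String.ofList ("address=".toList ++ PySem.Chars.join ['+'] tokens)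

-- ===== PRECONDITION & SPEC =====
def Spec_split_park_name_for_url (unit_name_in : String) (out : String) : Prop := out = split_park_name_for_url_alt unit_name_in
instance (unit_name_in : String) (out : String) : Decidable (Spec_split_park_name_for_url unit_name_in out) := by unfold Spec_split_park_name_for_url; infer_instance

-- ===== CLAIM (what is proved, stated in full; the proofs are below) =====
def Claim_equal_split_park_name_for_url : Prop := ∀ (unit_name_in : String), Dom_split_park_name_for_url unit_name_in → Spec_split_park_name_for_url unit_name_in (split_park_name_for_url unit_name_in)

-- ===== LEMMAS AND PROOFS =====

-- structural single-character splitter used only in the proofs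
def mySplit (c : Char) : List Char → List (List Char)
  | [] => [[]]
  | x :: xs =>
    if x = c then [] :: mySplit c xs
    else
      match mySplit c xs with
      | [] => [[x]]
      | h :: t => (x :: h) :: t

def mapHead (f : List Char → List Char) : List (List Char) → List (List Char)
  | [] => []
  | h :: t => f h :: t

theorem mySplit_ne_nil (c : Char) (l : List Char) : mySplit c l ≠ [] := by
  cases l with
  | nil => simp [mySplit]
  | cons x xs =>
    simp only [mySplit]
    split
    · simp
    · split <;> simp_all

theorem mySplit_cons_of_eq (c : Char) (m : List Char) :
    mySplit c (c :: m) = [] :: mySplit c m := by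
  simp [mySplit]

theorem mySplit_cons_of_ne (c x : Char) (m : List Char) (hx : x ≠ c) :
    mySplit c (x :: m) = mapHead (x :: ·) (mySplit c m) := by
  simp only [mySplit, if_neg hx]
  rcases hm : mySplit c m with _ | ⟨a, b⟩
  · exact absurd hm (mySplit_ne_nil c m)
  · simp [mapHead]

theorem mapHead_append (f : List Char → List Char) (a b : List (List Char)) (ha : a ≠ []) :
    mapHead f (a ++ b) = mapHead f a ++ b := by
  cases a with
  | nil => exact absurd rfl ha
  | cons h t => simp [mapHead]

theorem splitOn_go_single (c : Char) :
    ∀ (fuel : Nat) (l cur : List Char) (accs : List (List Char)), l.length ≤ fuel →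
      PySem.Chars.splitOn.go [c] fuel l cur accs =
        accs.reverse ++ mapHead (cur.reverse ++ ·) (mySplit c l) := by
  intro fuel
  induction fuel with
  | zero =>
    intro l cur accs h
    have : l = [] := List.length_eq_zero_iff.mp (Nat.le_zero.mp h)
    subst this
    simp [PySem.Chars.splitOn.go, mySplit, mapHead]
  | succ n ih =>
    intro l cur accs h
    cases l with
    | nil => simp [PySem.Chars.splitOn.go, mySplit, mapHead]
    | cons x rest =>
      simp only [PySem.Chars.splitOn.go]
      by_cases hx : x = c
      · subst hx
        have hpre : List.isPrefixOf [x] (x :: rest) = true := by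
          simp [List.isPrefixOf]
        rw [if_pos hpre]
        simp only [List.length_cons, List.drop_succ_cons, List.length_nil, List.drop_zero]
        rw [ih rest [] (cur.reverse :: accs) (Nat.le_of_succ_le_succ (by simpa using h))]
        rw [mySplit_cons_of_eq]
        rcases hm : mySplit x rest with _ | ⟨a, b⟩
        · exact absurd hm (mySplit_ne_nil _ _)
        · simp [mapHead]
      · have hpre : List.isPrefixOf [c] (x :: rest) = false := by
          simp [List.isPrefixOf]
          intro hc; exact absurd hc.symm hx
        rw [if_neg (by simp [hpre])]
        rw [ih rest (x :: cur) accs (Nat.le_of_succ_le_succ (by simpa using h))]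
        rw [mySplit_cons_of_ne c x rest hx]
        rcases hm : mySplit c rest with _ | ⟨a, b⟩
        · exact absurd hm (mySplit_ne_nil c rest)
        · simp [mapHead]

theorem splitOn_single (c : Char) (l : List Char) :
    PySem.Chars.splitOn l [c] = mySplit c l := by
  rw [PySem.Chars.splitOn,
    splitOn_go_single c (l.length + 1) l [] [] (Nat.le_succ _)]
  rcases hm : mySplit c l with _ | ⟨a, b⟩
  · exact absurd hm (mySplit_ne_nil c l)
  · simp [mapHead]

theorem replace_go_single (c d : Char) :
    ∀ (fuel : Nat) (l acc : List Char), l.length ≤ fuel →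
      PySem.Chars.replace.go [c] [d] fuel l acc =
        acc.reverse ++ l.map (fun x => if x = c then d else x) := by
  intro fuel
  induction fuel with
  | zero =>
    intro l acc h
    have : l = [] := List.length_eq_zero_iff.mp (Nat.le_zero.mp h)
    subst this
    simp [PySem.Chars.replace.go]
  | succ n ih =>
    intro l acc h
    cases l with
    | nil => simp [PySem.Chars.replace.go]
    | cons x rest =>
      simp only [PySem.Chars.replace.go]
      by_cases hx : x = c
      · subst hx
        have hpre : List.isPrefixOf [x] (x :: rest) = true := by simp [List.isPrefixOf]
        rw [if_pos hpre]
        simp only [List.length_cons, List.drop_succ_cons, List.length_nil, List.drop_zero]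
        rw [ih rest ([d].reverse ++ acc) (Nat.le_of_succ_le_succ (by simpa using h))]
        simp
      · have hpre : List.isPrefixOf [c] (x :: rest) = false := by
          simp [List.isPrefixOf]
          intro hc; exact absurd hc.symm hx
        rw [if_neg (by simp [hpre])]
        rw [ih rest (x :: acc) (Nat.le_of_succ_le_succ (by simpa using h))]
        simp [hx]

theorem replace_single (c d : Char) (l : List Char) :
    PySem.Chars.replace l [c] [d] = l.map (fun x => if x = c then d else x) := by
  rw [PySem.Chars.replace]
  simp only [List.isEmpty_cons, Bool.false_eq_true, if_false]
  rw [replace_go_single c d l.length l [] (Nat.le_refl _)]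
  simp

-- splitting on ' ' after turning ',' into ' ' = split on ',' then split each chunk on ' '
theorem mySplit_replace (l : List Char) :
    mySplit ' ' (l.map (fun x => if x = ',' then ' ' else x)) =
      (mySplit ',' l).flatMap (mySplit ' ') := by
  induction l with
  | nil => simp [mySplit]
  | cons x xs ih =>
    by_cases hc : x = ','
    · subst hc
      simp only [List.map_cons, reduceIte]
      rw [mySplit_cons_of_eq, mySplit_cons_of_eq, ih]
      simp [mySplit]
    · by_cases hs : x = ' '
      · simp only [List.map_cons]
        rw [if_neg hc, hs, mySplit_cons_of_eq, mySplit_cons_of_ne ',' ' ' xs (by decide), ih]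
        rcases hsplit : mySplit ',' xs with _ | ⟨h0, t0⟩
        · exact absurd hsplit (mySplit_ne_nil _ _)
        · have e1 : mapHead (fun y => ' ' :: y) (h0 :: t0) = (' ' :: h0) :: t0 := rfl
          rw [e1, List.flatMap_cons, List.flatMap_cons, mySplit_cons_of_eq]
          simp
      · simp only [List.map_cons]
        rw [if_neg hc, mySplit_cons_of_ne ' ' x _ hs, mySplit_cons_of_ne ',' x xs hc, ih]
        rcases hsplit : mySplit ',' xs with _ | ⟨h0, t0⟩
        · exact absurd hsplit (mySplit_ne_nil _ _)
        · have e1 : mapHead (fun y => x :: y) (h0 :: t0) = (x :: h0) :: t0 := rfl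
          rw [e1, List.flatMap_cons, List.flatMap_cons, mySplit_cons_of_ne ' ' x h0 hs,
            mapHead_append _ _ _ (mySplit_ne_nil ' ' h0)]

-- A's enumerate loop over indices starting at 1 just appends '+'-prefixed tokens
theorem enum_loop_tail (t : List (List Char)) :
    ∀ (k : Int) (acc : List Char), 1 ≤ k →
      (PySem.List.enumerate t k).foldl
        (fun (r : Option (List Char)) ic =>
          if ic.1 = 0 then some ("address=".toList ++ ic.2)
          else some ((r.getD []) ++ '+' :: ic.2)) (some acc) =
        some (acc ++ t.flatMap (fun x => '+' :: x)) := by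
  induction t with
  | nil => intro k acc hk; simp [PySem.List.enumerate]
  | cons h t ih =>
    intro k acc hk
    simp only [PySem.List.enumerate, List.foldl_cons]
    rw [if_neg (by omega)]
    simp only [Option.getD_some]
    rw [ih (k + 1) _ (by omega)]
    simp

theorem join_plus (h : List Char) (t : List (List Char)) :
    PySem.Chars.join ['+'] (h :: t) = h ++ t.flatMap (fun x => '+' :: x) := by
  induction t generalizing h with
  | nil => simp [PySem.Chars.join, List.intercalate]
  | cons h2 t2 ih =>
    rw [PySem.Chars.join_cons_cons, ih h2]
    simp

-- ===== VERDICT (by name: the statement is the Claim_ definition above) =====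
theorem split_park_name_for_url_spec : Claim_equal_split_park_name_for_url := by
  intro s _
  unfold Spec_split_park_name_for_url split_park_name_for_url split_park_name_for_url_alt
  simp only [PySem.Chars.split?, List.isEmpty_cons, Bool.false_eq_true, if_false,
    replace_single, splitOn_single]
  rw [mySplit_replace]
  rw [PySem.List.foldl_congr_mem _ _ (fun acc chunk => acc ++ mySplit ' ' chunk) _
    (by intro acc chunk _; exact PySem.List.foldl_append_singleton _ _)]
  rw [PySem.List.foldl_append_eq_flatMap]
  simp only [List.nil_append]
  rcases hsplit : (mySplit ',' s.toList).flatMap (mySplit ' ') with _ | ⟨h0, t0⟩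
  · rcases hcs : mySplit ',' s.toList with _ | ⟨c0, cs⟩
    · exact absurd hcs (mySplit_ne_nil _ _)
    · rw [hcs, List.flatMap_cons] at hsplit
      rcases hs0 : mySplit ' ' c0 with _ | _
      · exact absurd hs0 (mySplit_ne_nil _ _)
      · rw [hs0] at hsplit; simp at hsplit
  · simp only [PySem.List.enumerate, List.foldl_cons, reduceIte]
    rw [enum_loop_tail t0 (0 + 1) _ (by norm_num)]
    rw [join_plus h0 t0]
    simp
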